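-- pv_equiv track=rewrite | github.com/NSLS-II/lsdc | beamline_support.py | waveform_to_string
-- ===== SOURCE A (Python) =====
-- def waveform_to_string(wave):
--     s = ""
--     for i in range(0, len(wave)):
--         if wave[i] == 0:
--             break
--         else:
--             s = s + "%c" % wave[i]
--     return s
-- ===== SOURCE B (Python) =====
-- def waveform_to_string(wave):
--     # Divide and conquer: convert the left half; a zero occurred there iff the
--     # converted string is shorter than the half, in which case the right half
--     # is never touched; otherwise convert the right half and concatenate.
--     if len(wave) <= 1:
--         return "" if not wave or wave[0] == 0 else "%c" % wave[0]
--     mid = len(wave) // 2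
--     left = waveform_to_string(wave[:mid])
--     if len(left) < mid:
--         return left
--     return left + waveform_to_string(wave[mid:])
-- ===== Notes on version B (the rewrite author's own statement) =====
-- stated objective: alternative
-- what changed: Replaces A's single index loop with break and repeated accumulator concatenation by a divide-and-conquer recursion: convert the left half, detect a terminator there by comparing the converted length to the half length, and only then convert and append the right half (O(log n) recursion depth, no index loop, no break).
import Mathlib
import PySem

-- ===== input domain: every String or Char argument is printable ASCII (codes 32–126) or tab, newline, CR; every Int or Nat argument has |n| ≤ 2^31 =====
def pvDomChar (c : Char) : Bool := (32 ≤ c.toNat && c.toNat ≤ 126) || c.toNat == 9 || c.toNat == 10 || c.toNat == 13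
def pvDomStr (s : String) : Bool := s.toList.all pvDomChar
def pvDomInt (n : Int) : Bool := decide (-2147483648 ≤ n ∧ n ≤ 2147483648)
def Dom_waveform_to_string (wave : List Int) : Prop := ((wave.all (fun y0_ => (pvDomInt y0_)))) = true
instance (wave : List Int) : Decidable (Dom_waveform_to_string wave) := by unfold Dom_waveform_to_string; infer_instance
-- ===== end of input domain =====

-- B replaces A's fused index loop (break + accumulator concatenation) by a divide-and-conquer
-- recursion: convert the left half, detect a terminator there by comparing lengths, and only
-- then convert and append the right half.

-- ===== PORT A =====
-- A's for-loop with break, carrying the accumulator s; "%c" % c ported as Char.ofNat (exact for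
-- the non-surrogate codes 0 < c < 0x110000 admitted by Pre_)
def pvWtsLoop : List Int → String → String
  | [], s => s
  | c :: rest, s => if c == 0 then s else pvWtsLoop rest (s ++ String.ofList [Char.ofNat c.toNat])

def waveform_to_string (wave : List Int) : String := pvWtsLoop wave ""

-- ===== PORT B =====
-- divide and conquer, following Source B; fuel = wave.length is a pure totality guard (each
-- recursive call halves a strictly shorter list, so fuel never runs out); len(left) < mid
-- is left.toList.length < mid
def pvAltGo : Nat → List Int → String
  | _, [] => ""
  | fuel, c :: rest =>
    if (c :: rest).length ≤ 1 then
      (if c == 0 then "" else String.ofList [Char.ofNat c.toNat])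
    else
      match fuel with
      | 0 => ""  -- unreachable: fuel ≥ length ≥ 2 here
      | fuel + 1 =>
        let mid := (c :: rest).length / 2
        let left := pvAltGo fuel ((c :: rest).take mid)
        if left.toList.length < mid then left
        else left ++ pvAltGo fuel ((c :: rest).drop mid)

def waveform_to_string_alt (wave : List Int) : String := pvAltGo wave.length wave

-- ===== PRECONDITION & SPEC =====
-- Pre_ excludes waveforms whose prefix before the first zero contains a negative or ≥ 0x110000
-- code (Python A raises OverflowError there) or a lone-surrogate code 0xD800–0xDFFF (A returns a
-- lone-surrogate string, which has no representation as a Lean String).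
def Pre_waveform_to_string (wave : List Int) : Prop :=
  ∀ c ∈ wave.takeWhile (fun c => c ≠ 0), (0 < c ∧ c < 55296) ∨ (57343 < c ∧ c < 1114112)
instance (wave : List Int) : Decidable (Pre_waveform_to_string wave) := by unfold Pre_waveform_to_string; infer_instance
def pvWitness_waveform_to_string : List Int := [72, 105, 0, 7]

def Spec_waveform_to_string (wave : List Int) (out : String) : Prop := out = waveform_to_string_alt wave
instance (wave : List Int) (out : String) : Decidable (Spec_waveform_to_string wave out) := by unfold Spec_waveform_to_string; infer_instance

-- ===== CLAIM (what is proved, stated in full; the proofs are below) =====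
def Claim_equal_waveform_to_string : Prop := ∀ (wave : List Int), Dom_waveform_to_string wave → Pre_waveform_to_string wave → Spec_waveform_to_string wave (waveform_to_string wave)

-- ===== LEMMAS AND PROOFS =====

-- the common canonical value: the converted ≠0-prefix
def pvWtsCanon (wave : List Int) : String :=
  String.ofList ((wave.takeWhile (fun c => !(c == 0))).map (fun c => Char.ofNat c.toNat))

lemma wtsLoop_eq (wave : List Int) (s : String) :
    pvWtsLoop wave s = s ++ pvWtsCanon wave := by
  induction wave generalizing s with
  | nil => simp [pvWtsLoop, pvWtsCanon]
  | cons c rest ih =>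
    by_cases h : c = 0
    · simp [pvWtsLoop, pvWtsCanon, h]
    · simp only [pvWtsLoop, beq_iff_eq, h, if_false, ih, pvWtsCanon, List.takeWhile_cons]
      simp [h, ← String.ofList_append, String.append_assoc]

lemma altGo_eq_canon : ∀ (fuel : ℕ) (wave : List Int), wave.length ≤ fuel →
    pvAltGo fuel wave = pvWtsCanon wave := by
  intro fuel
  induction fuel with
  | zero =>
    intro wave hw
    have : wave = [] := List.eq_nil_of_length_eq_zero (Nat.le_zero.mp hw)
    subst this
    simp [pvAltGo, pvWtsCanon]
  | succ n ih =>
    intro wave hw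
    match wave with
    | [] => simp [pvAltGo, pvWtsCanon]
    | c :: rest =>
      rw [pvAltGo]
      by_cases hle : (c :: rest).length ≤ 1
      · rw [if_pos hle]
        have : rest = [] := by
          simp only [List.length_cons] at hle
          exact List.eq_nil_of_length_eq_zero (by omega)
        subst this
        by_cases h : c = 0 <;> simp [pvWtsCanon, h]
      · rw [if_neg hle]
        simp only []
        set wave := c :: rest with hwave
        set mid := wave.length / 2 with hmid
        have hlen2 : 2 ≤ wave.length := by omega
        have hmid1 : 1 ≤ mid := by omega
        have hmidlt : mid < wave.length := by omega
        have hmidlen : (wave.take mid).length = mid := by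
          simp only [List.length_take]; omega
        have ihl : pvAltGo n (wave.take mid) = pvWtsCanon (wave.take mid) :=
          ih _ (by simp only [List.length_take]; omega)
        have ihr : pvAltGo n (wave.drop mid) = pvWtsCanon (wave.drop mid) :=
          ih _ (by simp only [List.length_drop]; omega)
        have hsplit := List.takeWhile_append
          (p := fun c => !(c == 0)) (xs := wave.take mid) (ys := wave.drop mid)
        rw [List.take_append_drop] at hsplit
        have hlc : (pvAltGo n (wave.take mid)).toList.length
            = ((wave.take mid).takeWhile (fun c => !(c == 0))).length := by
          simp [ihl, pvWtsCanon]
        by_cases hlt : (pvAltGo n (wave.take mid)).toList.length < mid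
        · -- a zero occurs in the left half: takeWhile stops inside it
          have hne : ((wave.take mid).takeWhile (fun c => !(c == 0))).length ≠ (wave.take mid).length := by
            omega
          rw [if_neg hne] at hsplit
          simp only [if_pos hlt]
          simp [ihl, pvWtsCanon, hsplit]
        · -- no zero in the left half: takeWhile keeps all of it and continues right
          have heq : ((wave.take mid).takeWhile (fun c => !(c == 0))).length = (wave.take mid).length := by
            have := ((wave.take mid).takeWhile_prefix (fun c => !(c == 0))).length_le
            omega
          have htw : (wave.take mid).takeWhile (fun c => !(c == 0)) = wave.take mid :=
            (List.takeWhile_prefix _).eq_of_length heq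
          rw [if_pos heq] at hsplit
          simp only [if_neg hlt]
          simp [ihl, ihr, pvWtsCanon, hsplit, htw, ← String.ofList_append]

lemma alt_eq_canon (wave : List Int) : waveform_to_string_alt wave = pvWtsCanon wave :=
  altGo_eq_canon wave.length wave le_rfl

-- ===== VERDICT (by name: the statement is the Claim_ definition above) =====
theorem waveform_to_string_spec : Claim_equal_waveform_to_string := by
  intro wave _ _
  unfold Spec_waveform_to_string waveform_to_string
  rw [wtsLoop_eq, alt_eq_canon]
  simp
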